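-- pv_equiv track=rewrite | github.com/delfinaronco/algoritmos-1 | parcial_y_extras.py | posiciones_chiquita
-- ===== SOURCE A (Python) =====
-- def posiciones_chiquita(M: list) -> list:
--
--     n = len(M)
--     res = []
--
--     # Iterar sobre cada columna
--     for j in range(n):
--         # Encontrar el valor mínimo en la columna
--         min_valor = M[0][j]
--
--         for i in range(1, n):
--             if M[i][j] < min_valor:
--                 min_valor = M[i][j]
--
--         # Buscar las posiciones con el valor mínimo en la columna
--         for i in range(n):
--             if M[i][j] == min_valor:
--                 res.append((i, j))
--
--     return res
-- ===== SOURCE B (Python) =====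
-- def posiciones_chiquita(M: list) -> list:
--     n = len(M)
--     res = []
--     for j in range(n):
--         # single pass: track current minimum and its positions together
--         min_valor = M[0][j]
--         positions = [(0, j)]
--         for i in range(1, n):
--             v = M[i][j]
--             if v < min_valor:
--                 min_valor = v
--                 positions = [(i, j)]
--             elif v == min_valor:
--                 positions.append((i, j))
--         res.extend(positions)
--     return res
-- ===== Notes on version B (the rewrite author's own statement) =====
-- stated objective: alternative
-- what changed: Each column is scanned once, tracking the running minimum and its position list together (reset on a new minimum), instead of A's two passes per column (one to find the min, one to collect positions).
import Mathlib
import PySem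

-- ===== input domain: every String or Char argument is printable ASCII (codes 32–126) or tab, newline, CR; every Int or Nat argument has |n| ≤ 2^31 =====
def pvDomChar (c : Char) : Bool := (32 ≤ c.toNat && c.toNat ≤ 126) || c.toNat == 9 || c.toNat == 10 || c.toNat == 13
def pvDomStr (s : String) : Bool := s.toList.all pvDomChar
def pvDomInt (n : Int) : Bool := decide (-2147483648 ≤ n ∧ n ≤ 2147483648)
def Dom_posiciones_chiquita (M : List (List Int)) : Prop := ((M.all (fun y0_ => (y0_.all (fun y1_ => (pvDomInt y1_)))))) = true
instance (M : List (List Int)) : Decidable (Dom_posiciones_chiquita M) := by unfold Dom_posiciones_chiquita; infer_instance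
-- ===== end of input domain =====

-- B scans each column once, tracking the running minimum together with its position list
-- (reset on a new minimum), instead of A's two passes per column (find min, then collect).


-- ===== PORT A =====
-- M[i][j]; exact under Pre_ (all accessed indices are in range; Python raises IndexError outside Pre_)
def pvIdx (M : List (List Int)) (i j : Nat) : Int := (M.getD i []).getD j 0

-- inner loop 'for i in range(1, n): if M[i][j] < min_valor: min_valor = M[i][j]'  (k = n-1 elements)
def pvMinCol (M : List (List Int)) (j k : Nat) : Int :=
  (List.range' 1 k).foldl (fun m i => if pvIdx M i j < m then pvIdx M i j else m) (pvIdx M 0 j)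

def posiciones_chiquita (M : List (List Int)) : List (Int × Int) :=
  let n := M.length
  (List.range n).foldl (fun res j =>
    let min_valor := pvMinCol M j (n - 1)
    (List.range n).foldl (fun r i =>
      if pvIdx M i j = min_valor then r ++ [((i : Int), (j : Int))] else r) res) []

-- ===== PORT B =====
-- single pass over rows 1..n-1: state = (current min, its positions so far)
def pvScanCol (M : List (List Int)) (j k : Nat) : Int × List (Int × Int) :=
  (List.range' 1 k).foldl (fun s i =>
    if pvIdx M i j < s.1 then (pvIdx M i j, [((i : Int), (j : Int))])
    else if pvIdx M i j = s.1 then (s.1, s.2 ++ [((i : Int), (j : Int))])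
    else s)
    (pvIdx M 0 j, [((0 : Int), (j : Int))])

def posiciones_chiquita_alt (M : List (List Int)) : List (Int × Int) :=
  let n := M.length
  (List.range n).foldl (fun res j => res ++ (pvScanCol M j (n - 1)).2) []

-- ===== PRECONDITION & SPEC =====
-- A indexes M[i][j] for all i, j < len(M): it raises IndexError iff some row is shorter than len(M).
def Pre_posiciones_chiquita (M : List (List Int)) : Prop := ∀ row ∈ M, M.length ≤ row.length
instance (M : List (List Int)) : Decidable (Pre_posiciones_chiquita M) := by unfold Pre_posiciones_chiquita; infer_instance
def pvWitness_posiciones_chiquita : List (List Int) := [[1, 2], [3, 0]]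

def Spec_posiciones_chiquita (M : List (List Int)) (out : List (Int × Int)) : Prop := out = posiciones_chiquita_alt M
instance (M : List (List Int)) (out : List (Int × Int)) : Decidable (Spec_posiciones_chiquita M out) := by unfold Spec_posiciones_chiquita; infer_instance

-- ===== CLAIM (what is proved, stated in full; the proofs are below) =====
def Claim_equal_posiciones_chiquita : Prop := ∀ (M : List (List Int)), Dom_posiciones_chiquita M → Pre_posiciones_chiquita M → Spec_posiciones_chiquita M (posiciones_chiquita M)

-- ===== LEMMAS AND PROOFS =====

-- positions of the column minimum among rows 0..k, as A computes them
def pvPos (M : List (List Int)) (j k : Nat) : List (Int × Int) :=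
  ((List.range (k + 1)).filter (fun i => decide (pvIdx M i j = pvMinCol M j k))).map
    (fun i => (((i : Nat) : Int), ((j : Nat) : Int)))

theorem pvMinCol_succ (M : List (List Int)) (j k : Nat) :
    pvMinCol M j (k + 1) =
      if pvIdx M (1 + k) j < pvMinCol M j k then pvIdx M (1 + k) j else pvMinCol M j k := by
  simp [pvMinCol, List.range'_concat]

theorem pvMinCol_le (M : List (List Int)) (j k : Nat) :
    ∀ i ≤ k, pvMinCol M j k ≤ pvIdx M i j := by
  induction k with
  | zero =>
      intro i hi
      have h0 : i = 0 := Nat.le_zero.mp hi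
      subst h0
      simp [pvMinCol]
  | succ k ih =>
      intro i hi
      rw [pvMinCol_succ]
      by_cases hik : i ≤ k
      · have := ih i hik
        split_ifs with h
        · exact le_trans (le_of_lt h) this
        · exact this
      · have hi' : i = k + 1 := by omega
        subst hi'
        have h1k : (1 + k) = k + 1 := by omega
        rw [h1k]
        split_ifs with h
        · exact le_refl _
        · exact le_of_not_gt h
  
theorem pvScanCol_eq (M : List (List Int)) (j k : Nat) :
    pvScanCol M j k = (pvMinCol M j k, pvPos M j k) := by
  induction k with
  | zero => simp [pvScanCol, pvPos, pvMinCol]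
  | succ k ih =>
      have hstep : pvScanCol M j (k + 1) =
          (fun (s : Int × List (Int × Int)) (i : Nat) =>
            if pvIdx M i j < s.1 then (pvIdx M i j, [((i : Int), (j : Int))])
            else if pvIdx M i j = s.1 then (s.1, s.2 ++ [((i : Int), (j : Int))])
            else s) (pvScanCol M j k) (1 + k) := by
        simp [pvScanCol, List.range'_concat]
      rw [hstep, ih]
      have h1k : (1 + k) = k + 1 := by omega
      rw [h1k]
      have hrange : List.range (k + 1 + 1) = List.range (k + 1) ++ [k + 1] := List.range_succ
      by_cases hlt : pvIdx M (k + 1) j < pvMinCol M j k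
      · -- new strict minimum: positions reset to the single row k+1
        have hmin : pvMinCol M j (k + 1) = pvIdx M (k + 1) j := by
          rw [pvMinCol_succ, h1k]; simp [hlt]
        have hnone : (List.range (k + 1)).filter
            (fun i => decide (pvIdx M i j = pvMinCol M j (k + 1))) = [] := by
          apply List.filter_eq_nil_iff.mpr
          intro i hi
          have hik : i ≤ k := by have := List.mem_range.mp hi; omega
          have hle := pvMinCol_le M j k i hik
          rw [hmin]
          simp only [decide_eq_true_eq]
          intro heq
          rw [heq] at hle; omega
        simp only [hlt, if_pos]
        unfold pvPos
        rw [hrange, List.filter_append, hnone, hmin]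
        simp
      · simp only [hlt, if_false]
        have hmin : pvMinCol M j (k + 1) = pvMinCol M j k := by
          rw [pvMinCol_succ, h1k]; simp [hlt]
        by_cases heq : pvIdx M (k + 1) j = pvMinCol M j k
        · -- equals the current minimum: append (k+1, j)
          simp only [heq, if_pos]
          unfold pvPos
          rw [hrange, List.filter_append, hmin]
          simp [heq]
        · -- strictly larger: state unchanged
          simp only [heq, if_false]
          unfold pvPos
          rw [hrange, List.filter_append, hmin]
          simp [heq]

-- A's inner collection loop over one column equals B's single-pass positions
theorem pvCol_eq (M : List (List Int)) (j : Nat) (res : List (Int × Int)) (hM : M ≠ []) :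
    (List.range M.length).foldl (fun r i =>
      if pvIdx M i j = pvMinCol M j (M.length - 1) then r ++ [((i : Int), (j : Int))] else r) res
    = res ++ (pvScanCol M j (M.length - 1)).2 := by
  rw [PySem.List.foldl_append_ite (p := fun i => pvIdx M i j = pvMinCol M j (M.length - 1))
      (f := fun i => (((i : Nat) : Int), ((j : Nat) : Int)))]
  rw [pvScanCol_eq]
  have hn : M.length - 1 + 1 = M.length := by
    cases M with
    | nil => exact absurd rfl hM
    | cons a l => simp
  simp only [pvPos, hn]

-- ===== VERDICT (by name: the statement is the Claim_ definition above) =====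
theorem posiciones_chiquita_spec : Claim_equal_posiciones_chiquita := by
  intro M _ _
  unfold Spec_posiciones_chiquita posiciones_chiquita posiciones_chiquita_alt
  cases hM : M with
  | nil => simp
  | cons a l =>
      rw [← hM]
      have hne : M ≠ [] := by rw [hM]; simp
      apply PySem.List.foldl_congr_mem
      intro acc j _
      exact pvCol_eq M j acc hne
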